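-- pv_equiv track=rewrite | github.com/dsi-icl/do-voice-interaction | gdo_voicebot/grammar_correction_service/model_utils.py | create_mask_set
-- ===== SOURCE A (Python) =====
-- def create_mask_set(sentence, mask_ids):
--   """
--     For each input sentence create sentence with masked words at mask_ids
--   """
--
--   sentences = []
--   sent = sentence.strip().split()
--   for i in range(len(sent)):
--     # [MASK] each word at mask_ids
--     if i in mask_ids:
--         new_sent = sent[:]
--         new_sent[i] = '[MASK]'
--         sentences.append('[CLS] ' + " ".join(new_sent) + ' [SEP]')
--
--   return sentences
-- ===== SOURCE B (Python) =====
-- def create_mask_set(sentence, mask_ids):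
--     """
--       For each input sentence create sentence with masked words at mask_ids
--     """
--     sent = sentence.strip().split()
--     n = len(sent)
--     pref = ['']                       # pref[i] = words 0..i-1, each followed by one space
--     for w in sent:
--         pref.append(pref[-1] + w + ' ')
--     suf = ['']                        # suf[j] = words j..n-1, each preceded by one space
--     for w in reversed(sent):
--         suf.append(' ' + w + suf[-1])
--     suf.reverse()
--     return ['[CLS] ' + pref[i] + '[MASK]' + suf[i + 1] + ' [SEP]'
--             for i in range(n) if i in mask_ids]
-- ===== Notes on version B (the rewrite author's own statement) =====
-- stated objective: alternative
-- what changed: Instead of copying the whole word list and re-joining it for every masked position, B precomputes two scan tables once (pref[i] = words before i joined with trailing spaces, suf[j] = words from j on joined with leading spaces) and emits each masked sentence as the three-piece concatenation '[CLS] ' + pref[i] + '[MASK]' + suf[i+1] + ' [SEP]'.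
import Mathlib
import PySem

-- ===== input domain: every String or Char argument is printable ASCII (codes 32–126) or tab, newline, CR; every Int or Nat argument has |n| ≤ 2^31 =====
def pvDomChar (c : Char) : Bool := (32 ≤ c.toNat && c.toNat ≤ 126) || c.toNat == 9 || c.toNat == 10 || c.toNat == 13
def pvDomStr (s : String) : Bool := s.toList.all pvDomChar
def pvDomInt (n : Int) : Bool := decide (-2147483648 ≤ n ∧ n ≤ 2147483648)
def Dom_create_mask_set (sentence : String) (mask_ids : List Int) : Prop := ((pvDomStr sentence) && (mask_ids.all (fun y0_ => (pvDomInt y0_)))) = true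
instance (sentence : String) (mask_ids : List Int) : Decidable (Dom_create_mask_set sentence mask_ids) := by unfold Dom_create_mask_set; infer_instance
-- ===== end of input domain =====

-- B replaces A's copy-the-word-list-and-rejoin per masked position with precomputed prefix/suffix
-- join tables (pref[i], suf[j]) assembled once, each masked sentence being three-string concatenation
-- (objective: alternative — a different data structure, not claimed faster).


-- ===== PORT A =====
def create_mask_set (sentence : String) (mask_ids : List Int) : List String :=
  let sent := PySem.Str.split₀ (PySem.Str.strip sentence)
  (PySem.List.pyRange 0 (sent.length : Int) 1).foldl
    (fun sentences i =>
      if mask_ids.contains i then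
        -- new_sent = sent[:]; new_sent[i] = '[MASK]'  (i is always in range here)
        sentences ++ ["[CLS] " ++ PySem.Str.join " "
            (PySem.List.pySetD (PySem.List.slice sent none none) i "[MASK]") ++ " [SEP]"]
      else sentences) []

-- ===== PORT B =====
def create_mask_set_alt (sentence : String) (mask_ids : List Int) : List String :=
  let sent := PySem.Str.split₀ (PySem.Str.strip sentence)
  let n := sent.length
  -- pref = ['']; for w in sent: pref.append(pref[-1] + w + ' ')
  let pref := sent.foldl (fun ps w => ps ++ [PySem.List.pyGetD ps (-1) "" ++ w ++ " "]) [""]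
  -- suf = ['']; for w in reversed(sent): suf.append(' ' + w + suf[-1]); suf.reverse()
  let suf := (sent.reverse.foldl
      (fun ss w => ss ++ [" " ++ w ++ PySem.List.pyGetD ss (-1) ""]) [""]).reverse
  ((PySem.List.pyRange 0 (n : Int) 1).filter (fun i => mask_ids.contains i)).map
    (fun i => "[CLS] " ++ PySem.List.pyGetD pref i "" ++ "[MASK]"
        ++ PySem.List.pyGetD suf (i + 1) "" ++ " [SEP]")

-- ===== PRECONDITION & SPEC =====
def Spec_create_mask_set (sentence : String) (mask_ids : List Int) (out : List String) : Prop := out = create_mask_set_alt sentence mask_ids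
instance (sentence : String) (mask_ids : List Int) (out : List String) : Decidable (Spec_create_mask_set sentence mask_ids out) := by unfold Spec_create_mask_set; infer_instance

-- ===== CLAIM (what is proved, stated in full; the proofs are below) =====
def Claim_equal_create_mask_set : Prop := ∀ (sentence : String) (mask_ids : List Int), Dom_create_mask_set sentence mask_ids → Spec_create_mask_set sentence mask_ids (create_mask_set sentence mask_ids)

-- ===== LEMMAS AND PROOFS =====

-- proof-only abbreviations: prefix/suffix joins at String and at List-Char level
def prefS (xs : List String) : String := xs.foldl (fun a w => a ++ w ++ " ") ""
def sufS (xs : List String) : String := xs.foldr (fun w a => " " ++ w ++ a) ""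
def prefC (xs : List (List Char)) : List Char := xs.foldl (fun a w => a ++ w ++ [' ']) []
def sufC (xs : List (List Char)) : List Char := xs.foldr (fun w a => [' '] ++ w ++ a) []

-- the append-scan loop produces the table of all prefix folds
theorem scan_foldl (g : String → String → String) (ws : List String) :
    ws.foldl (fun ps w => ps ++ [g (PySem.List.pyGetD ps (-1) "") w]) [""]
      = (List.range (ws.length + 1)).map (fun k => (ws.take k).foldl g "") := by
  induction ws using List.reverseRecOn with
  | nil => simp
  | append_singleton ws w ih =>
      rw [List.foldl_append, ih]
      simp only [List.foldl_cons, List.foldl_nil, List.length_append, List.length_cons,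
        List.length_nil, Nat.zero_add]
      have hlast : List.map (fun k => (ws.take k).foldl g "") (List.range (ws.length + 1))
          = List.map (fun k => (ws.take k).foldl g "") (List.range ws.length)
            ++ [ws.foldl g ""] := by
        rw [List.range_succ, List.map_append]; simp
      conv_lhs => rw [hlast]
      rw [PySem.List.pyGetD_neg_one_append_singleton, ← hlast]
      rw [List.range_succ (n := ws.length + 1), List.map_append]
      congr 1
      · apply List.map_congr_left
        intro k hk
        rw [List.take_append_of_le_length (by simpa using Nat.lt_succ_iff.mp (List.mem_range.mp hk))]
      · simp only [List.map_cons, List.map_nil]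
        rw [List.take_of_length_le (by simp), List.foldl_append]
        rfl

theorem pref_suf (ys : List (List Char)) : [' '] ++ prefC ys = sufC ys ++ [' '] := by
  induction ys with
  | nil => simp [prefC, sufC]
  | cons w t ih =>
      show [' '] ++ prefC (w :: t) = ([' '] ++ w ++ sufC t) ++ [' ']
      rw [show prefC (w :: t) = (w ++ [' ']) ++ prefC t by simp [prefC]]
      simp [List.append_assoc, ← ih]

theorem sufC_set (xs : List (List Char)) (m : List Char) (i : Nat) (h : i < xs.length) :
    sufC (xs.set i m) = sufC (xs.take i) ++ [' '] ++ m ++ sufC (xs.drop (i + 1)) := by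
  induction xs generalizing i with
  | nil => simp at h
  | cons w rest ih =>
      cases i with
      | zero => simp [sufC]
      | succ i =>
          have hi : i < rest.length := by simpa using h
          show sufC (w :: rest.set i m) = sufC (w :: rest.take i) ++ [' '] ++ m ++ _
          simp only [show ∀ y t, sufC (y :: t) = [' '] ++ y ++ sufC t from fun _ _ => rfl]
          rw [ih i hi]
          simp [List.append_assoc]

theorem joinC_cons (x : List Char) (xs : List (List Char)) :
    PySem.Chars.join [' '] (x :: xs) = x ++ sufC xs := by
  induction xs generalizing x with
  | nil => simp [sufC, PySem.Chars.join_singleton]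
  | cons y ys ih =>
      rw [PySem.Chars.join_cons_cons, ih y]
      simp [sufC, List.append_assoc]

theorem joinC_set (ws : List (List Char)) (m : List Char) (i : Nat) (h : i < ws.length) :
    PySem.Chars.join [' '] (ws.set i m) = prefC (ws.take i) ++ m ++ sufC (ws.drop (i + 1)) := by
  cases ws with
  | nil => simp at h
  | cons w rest =>
      cases i with
      | zero => simpa [prefC] using joinC_cons m rest
      | succ i =>
          have hi : i < rest.length := by simpa using h
          rw [List.set_cons_succ, joinC_cons, sufC_set rest m i hi]
          rw [show (w :: rest).take (i + 1) = w :: rest.take i from rfl]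
          rw [show prefC (w :: rest.take i) = (w ++ [' ']) ++ prefC (rest.take i) by
            simp [prefC]]
          rw [show (w :: rest).drop (i + 1 + 1) = rest.drop (i + 1) from rfl]
          simp only [← List.append_assoc]
          congr 2
          simpa [List.append_assoc] using congrArg (w ++ ·) (pref_suf (rest.take i)).symm

theorem toList_prefS (xs : List String) :
    (prefS xs).toList = prefC (xs.map String.toList) := by
  suffices h : ∀ s : String, (xs.foldl (fun a w => a ++ w ++ " ") s).toList
      = (xs.map String.toList).foldl (fun a w => a ++ w ++ [' ']) s.toList from h ""
  induction xs with
  | nil => intro s; simp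
  | cons w ws ih =>
      intro s
      rw [List.foldl_cons, List.map_cons, List.foldl_cons, ih]
      congr 1
      rw [String.toList_append, String.toList_append]
      rfl

theorem toList_sufS (xs : List String) :
    (sufS xs).toList = sufC (xs.map String.toList) := by
  induction xs with
  | nil => rfl
  | cons w ws ih =>
      show (" " ++ w ++ (sufS ws)).toList = [' '] ++ w.toList ++ sufC (ws.map String.toList)
      rw [String.toList_append, String.toList_append, ih]
      rfl

theorem joinS_set (ws : List String) (i : Nat) (h : i < ws.length) :
    PySem.Str.join " " (ws.set i "[MASK]")
      = prefS (ws.take i) ++ "[MASK]" ++ sufS (ws.drop (i + 1)) := by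
  apply String.toList_inj.mp
  rw [PySem.Str.toList_join, String.toList_append, String.toList_append,
      toList_prefS, toList_sufS, List.map_set, List.map_take, List.map_drop,
      show (" " : String).toList = [' '] from rfl]
  exact joinC_set (ws.map String.toList) ("[MASK]".toList) i (by simpa using h)

-- B's pref table entry i is the prefix fold of the first i words
theorem pref_entry (sent : List String) (i : Int) (h0 : 0 ≤ i) (h1 : i < (sent.length : Int)) :
    PySem.List.pyGetD
        (sent.foldl (fun ps w => ps ++ [PySem.List.pyGetD ps (-1) "" ++ w ++ " "]) [""]) i ""
      = prefS (sent.take i.toNat) := by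
  rw [show (fun (ps : List String) (w : String) => ps ++ [PySem.List.pyGetD ps (-1) "" ++ w ++ " "])
        = fun ps w => ps ++ [(fun a w => a ++ w ++ " ") (PySem.List.pyGetD ps (-1) "") w] from rfl,
      scan_foldl (fun a w => a ++ w ++ " ") sent]
  rw [PySem.List.pyGetD_eq_getElem _ _ h0 (by simp; omega)]
  simp [prefS]

-- B's suf table entry j is the suffix fold of the words from j on
theorem suf_entry (sent : List String) (j : Int) (h0 : 0 ≤ j) (h1 : j ≤ (sent.length : Int)) :
    PySem.List.pyGetD
        ((sent.reverse.foldl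
            (fun ss w => ss ++ [" " ++ w ++ PySem.List.pyGetD ss (-1) ""]) [""]).reverse) j ""
      = sufS (sent.drop j.toNat) := by
  rw [show (fun (ss : List String) (w : String) => ss ++ [" " ++ w ++ PySem.List.pyGetD ss (-1) ""])
        = fun ss w => ss ++ [(fun a w => " " ++ w ++ a) (PySem.List.pyGetD ss (-1) "") w] from rfl,
      scan_foldl (fun a w => " " ++ w ++ a) sent.reverse]
  have hlen : j < (((List.range (sent.reverse.length + 1)).map
      (fun k => (sent.reverse.take k).foldl (fun a w => " " ++ w ++ a) "")).reverse.length : Int) := by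
    simp; omega
  rw [PySem.List.pyGetD_eq_getElem _ _ h0 hlen]
  rw [List.getElem_reverse]
  simp only [List.length_map, List.length_range, List.length_reverse]
  rw [List.getElem_map, List.getElem_range]
  have hj : j.toNat ≤ sent.length := by omega
  have htake : sent.reverse.take (sent.length + 1 - 1 - j.toNat) = (sent.drop j.toNat).reverse := by
    have h2 : (sent.reverse.take (sent.length - j.toNat)).reverse = sent.drop j.toNat := by
      rw [List.reverse_take]
      simp [List.length_reverse]
      omega
    rw [show sent.length + 1 - 1 - j.toNat = sent.length - j.toNat from by omega]
    calc sent.reverse.take (sent.length - j.toNat)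
        = (sent.reverse.take (sent.length - j.toNat)).reverse.reverse :=
          (List.reverse_reverse _).symm
      _ = (sent.drop j.toNat).reverse := by rw [h2]
  rw [htake, List.foldl_reverse]
  rfl

-- ===== VERDICT (by name: the statement is the Claim_ definition above) =====
theorem create_mask_set_spec : Claim_equal_create_mask_set := by
  intro sentence mask_ids _
  unfold Spec_create_mask_set create_mask_set create_mask_set_alt
  dsimp only
  set sent := PySem.Str.split₀ (PySem.Str.strip sentence) with hsent
  rw [PySem.List.foldl_append_if (p := fun i => mask_ids.contains i), List.nil_append]
  apply List.map_congr_left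
  intro i hi
  have hmem := List.mem_filter.mp hi |>.1
  rw [PySem.List.mem_pyRange_one] at hmem
  obtain ⟨h0, hn⟩ := hmem
  rw [PySem.List.slice_none_none, PySem.List.pySetD_of_nonneg _ _ h0,
      joinS_set sent i.toNat (by omega),
      pref_entry sent i h0 hn, suf_entry sent (i + 1) (by omega) (by omega),
      show (i + 1).toNat = i.toNat + 1 from by omega]
  simp [String.append_assoc]
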